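-- pv_equiv track=rewrite | github.com/goossaert/doge | doge/rst_writer.py | merge_stable_areas
-- ===== SOURCE A (Python) =====
-- def merge_stable_areas(text):
--     text_merged = []
--     index = 0
--     while index < len(text):
--         if text[index].startswith(' '):
--             text_merged.append(text[index])
--             index += 1
--         else:
--             index_end = index
--             while index_end < len(text) and not text[index_end].startswith(' '):
--                 index_end += 1
--             text_merged.append(' '.join(text[index:index_end]))
--             index = index_end
--     return text_merged
-- ===== SOURCE B (Python) =====
-- def merge_stable_areas(text):
--     result = []
--     buffer = []
--     for line in text:
--         if line.startswith(' '):
--             if buffer: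
--                 result.append(' '.join(buffer))
--                 buffer = []
--             result.append(line)
--         else:
--             buffer.append(line)
--     if buffer:
--         result.append(' '.join(buffer))
--     return result
-- ===== Notes on version B (the rewrite author's own statement) =====
-- stated objective: alternative
-- what changed: Replaced A's outer-index/inner-while two-pointer scan with slicing by a single forward loop that accumulates the current non-indented run in a buffer and flushes it with ' '.join at each indented line and at the end.
import Mathlib
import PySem

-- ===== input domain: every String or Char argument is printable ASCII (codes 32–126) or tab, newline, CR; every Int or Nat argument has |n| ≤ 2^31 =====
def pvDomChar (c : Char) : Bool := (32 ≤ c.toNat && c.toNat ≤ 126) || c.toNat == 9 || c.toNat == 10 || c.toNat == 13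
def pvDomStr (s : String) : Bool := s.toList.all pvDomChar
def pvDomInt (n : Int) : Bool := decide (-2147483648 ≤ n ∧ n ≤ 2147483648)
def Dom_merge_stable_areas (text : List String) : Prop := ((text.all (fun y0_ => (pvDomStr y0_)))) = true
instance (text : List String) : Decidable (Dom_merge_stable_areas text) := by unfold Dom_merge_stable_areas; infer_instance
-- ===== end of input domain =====

-- B re-implements A's outer-index/inner-while two-pointer scan as a single forward
-- loop with a run buffer flushed at each indented line and at the end (objective:
-- alternative decomposition, same asymptotic cost).

-- ===== PORT A =====
-- inner while loop of A: splits off the leading run of lines not starting with ' '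
-- (the run = text[index:index_end], the remainder = text[index_end:])
def pvTakeRun : List String → List String × List String
  | [] => ([], [])
  | l :: rest =>
    if PySem.Str.startswith l " " then ([], l :: rest)
    else ((l :: (pvTakeRun rest).1), (pvTakeRun rest).2)

-- needed by the port's termination proof (cited in decreasing_by)
theorem pvTakeRun_len : ∀ (xs : List String), (pvTakeRun xs).2.length ≤ xs.length := by
  intro xs
  induction xs with
  | nil => simp [pvTakeRun]
  | cons l rest ih =>
    by_cases h : PySem.Chars.startswith l.toList [' '] = true <;> simp [pvTakeRun, h] <;> omega

def merge_stable_areas (text : List String) : List String :=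
  match text with
  | [] => []
  | l :: rest =>
    if h : PySem.Str.startswith l " " = true then
      l :: merge_stable_areas rest
    else
      PySem.Str.join " " (pvTakeRun (l :: rest)).1
        :: merge_stable_areas (pvTakeRun (l :: rest)).2
termination_by text.length
decreasing_by
  · simp
  · have hl := pvTakeRun_len rest
    simp at h
    simp [pvTakeRun, h]
    omega

-- ===== PORT B =====
def merge_stable_areas_alt (text : List String) : List String :=
  let s := text.foldl
    (fun (st : List String × List String) line =>
      if PySem.Str.startswith line " " then
        ((if st.2 ≠ [] then st.1 ++ [PySem.Str.join " " st.2] else st.1) ++ [line], [])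
      else (st.1, st.2 ++ [line]))
    ([], [])
  if s.2 ≠ [] then s.1 ++ [PySem.Str.join " " s.2] else s.1

-- ===== PRECONDITION & SPEC =====
def Spec_merge_stable_areas (text : List String) (out : List String) : Prop := out = merge_stable_areas_alt text
instance (text : List String) (out : List String) : Decidable (Spec_merge_stable_areas text out) := by unfold Spec_merge_stable_areas; infer_instance

-- ===== CLAIM (what is proved, stated in full; the proofs are below) =====
def Claim_equal_merge_stable_areas : Prop := ∀ (text : List String), Dom_merge_stable_areas text → Spec_merge_stable_areas text (merge_stable_areas text)

-- ===== LEMMAS AND PROOFS =====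

-- B's fold step, named so the induction can treat it atomically
def pvStep (st : List String × List String) (line : String) : List String × List String :=
  if PySem.Str.startswith line " " then
    ((if st.2 ≠ [] then st.1 ++ [PySem.Str.join " " st.2] else st.1) ++ [line], [])
  else (st.1, st.2 ++ [line])

theorem pvStep_indent (st : List String × List String) (line : String)
    (h : PySem.Chars.startswith line.toList [' '] = true) :
    pvStep st line = ((if st.2 ≠ [] then st.1 ++ [PySem.Str.join " " st.2] else st.1) ++ [line], []) := by
  simp [pvStep, h]

theorem pvStep_noindent (st : List String × List String) (line : String)
    (h : ¬ PySem.Chars.startswith line.toList [' '] = true) :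
    pvStep st line = (st.1, st.2 ++ [line]) := by
  simp [pvStep, h]

theorem alt_eq_foldl_pvStep (text : List String) :
    merge_stable_areas_alt text =
      (let s := text.foldl pvStep ([], [])
       if s.2 ≠ [] then s.1 ++ [PySem.Str.join " " s.2] else s.1) := rfl

-- recursive form of B's fold-with-final-flush, starting from buffer `buf`
def pvF : List String → List String → List String
  | [], buf => (if buf ≠ [] then [PySem.Str.join " " buf] else [])
  | l :: ls, buf =>
    if PySem.Str.startswith l " " then
      (if buf ≠ [] then [PySem.Str.join " " buf] else []) ++ l :: pvF ls []
    else pvF ls (buf ++ [l])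

theorem pvFold_eq_pvF (text : List String) : ∀ (res buf : List String),
    (let s := text.foldl pvStep (res, buf)
     if s.2 ≠ [] then s.1 ++ [PySem.Str.join " " s.2] else s.1)
    = res ++ pvF text buf := by
  induction text with
  | nil =>
    intro res buf
    by_cases h : buf = [] <;> simp [pvF, h]
  | cons l ls ih =>
    intro res buf
    by_cases h : PySem.Chars.startswith l.toList [' '] = true
    · rw [List.foldl_cons, pvStep_indent _ _ h, ih]
      by_cases hb : buf = [] <;> simp [pvF, h, hb, List.append_assoc]
    · rw [List.foldl_cons, pvStep_noindent _ _ h, ih]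
      simp [pvF, h]

theorem pvF_eq (text : List String) : ∀ (buf : List String),
    pvF text buf =
      (if buf ++ (pvTakeRun text).1 ≠ [] then [PySem.Str.join " " (buf ++ (pvTakeRun text).1)] else [])
        ++ merge_stable_areas (pvTakeRun text).2 := by
  induction text with
  | nil =>
    intro buf
    by_cases h : buf = [] <;> simp [pvF, pvTakeRun, merge_stable_areas, h]
  | cons l ls ih =>
    intro buf
    by_cases h : PySem.Chars.startswith l.toList [' '] = true
    · -- run boundary: pvTakeRun (l::ls) = ([], l::ls)
      have hmerge : pvF ls [] = merge_stable_areas ls := by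
        rw [ih]
        cases ls with
        | nil => simp [pvTakeRun, merge_stable_areas]
        | cons m ms =>
          by_cases hm : PySem.Chars.startswith m.toList [' '] = true
          · simp [pvTakeRun, hm, merge_stable_areas]
          · simp [pvTakeRun, hm, merge_stable_areas]
      by_cases hb : buf = [] <;>
        simp [pvF, pvTakeRun, h, hb, merge_stable_areas, hmerge]
    · have hap : buf ++ [l] ++ (pvTakeRun ls).1 = buf ++ (l :: (pvTakeRun ls).1) := by
        simp [List.append_assoc]
      rw [pvF, if_neg (by simpa using h), ih, hap]
      simp [pvTakeRun, h]

theorem pvF_nil_eq (text : List String) : pvF text [] = merge_stable_areas text := by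
  rw [pvF_eq]
  cases text with
  | nil => simp [pvTakeRun, merge_stable_areas]
  | cons m ms =>
    by_cases hm : PySem.Chars.startswith m.toList [' '] = true
    · simp [pvTakeRun, hm, merge_stable_areas]
    · conv_rhs => rw [merge_stable_areas]
      simp [pvTakeRun, hm]

theorem merge_eq_alt (text : List String) :
    merge_stable_areas text = merge_stable_areas_alt text := by
  rw [alt_eq_foldl_pvStep, pvFold_eq_pvF, pvF_nil_eq, List.nil_append]

-- ===== VERDICT (by name: the statement is the Claim_ definition above) =====
theorem merge_stable_areas_spec : Claim_equal_merge_stable_areas := by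
  intro text _
  unfold Spec_merge_stable_areas
  exact merge_eq_alt text
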